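-- pv_equiv track=rewrite | github.com/sidamarnath/DataStructures-Algorithms | CC3/solution.py | calculate
-- ===== SOURCE A (Python) =====
-- from typing import List, Tuple
--
-- def calculate(participants: List[str], character_details: List[Tuple[str, str, int]]) \
--         -> List[Tuple[str, int]]:
--     """
--     Calculates each participants power score.
--     :param participants: contains the names of each participant in the tournament in the order they are lined up.
--         May contain duplicates.
--     : param character_details: contains the English and Japanese name of each character,
--         along with the power level of the associated character
--     :return: Tuple of participants name and final power score.
--     """
--
--     # ! Runtime Complexity -> O(n * m)
--     # ! Spacetime Complexity -> O(n + m)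
--
--     english_to_japanese = {}
--     japanese_to_english = {}
--     power_levels = []
--     output_list = []
--
--     for participant in participants:
--         for character in character_details:
--             # name is english
--             if 65 <= ord(participant[0]) <= 122:
--                 if participant == character[0]:
--                     english_to_japanese[participant] = character[1]
--                     japanese_to_english[character[1]] = participant
--                     power_levels.append(character[2])
--                 if participant == character[1]:
--                     english_to_japanese[participant] = character[0]
--                     japanese_to_english[character[0]] = participant
--                     power_levels.append(character[2])
--             # name is japanese
--             else:
--                 if participant == character[0]:
--                     japanese_to_english[participant] = character[1]
--                     english_to_japanese[character[1]] = participant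
--                     power_levels.append(character[2])
--
--                 if participant == character[1]:
--                     japanese_to_english[participant] = character[0]
--                     english_to_japanese[character[0]] = participant
--                     power_levels.append(character[2])
--
--
--     for i in range(len(power_levels)):
--         power_level_score = 0
--         for j in range(i + 1, len(power_levels)):
--             if power_levels[i] >= power_levels[j]:
--                 power_level_score += power_levels[j]
--             else:
--                 break
--
--         # participants name is english
--         if 65 <= ord(participants[i][0]) <= 122:
--             if power_levels[i] > 9000:
--                 output_list.append((english_to_japanese[participants[i]], power_level_score))
--             else:
--                 output_list.append((participants[i], power_level_score))
--         # participants name is japanese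
--         else:
--             if power_levels[i] > 9000:
--                 output_list.append((participants[i], power_level_score))
--             else:
--                 output_list.append((japanese_to_english[participants[i]], power_level_score))
--
--     return output_list
-- ===== SOURCE B (Python) =====
-- def calculate(participants, character_details):
--     other = {}
--     for eng, jap, power in character_details:
--         other[eng] = (jap, power)
--         other[jap] = (eng, power)
--     powers = [other[p][1] for p in participants if p in other]
--     n = len(powers)
--     prefix = [0]
--     for x in powers:
--         prefix.append(prefix[-1] + x)
--     stack = []
--     ng = []
--     for i in reversed(range(n)):
--         while stack and powers[stack[-1]] <= powers[i]:
--             stack.pop()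
--         ng.append(stack[-1] if stack else n)
--         stack.append(i)
--     ng.reverse()
--     output = []
--     for i in range(n):
--         name = participants[i]
--         score = prefix[ng[i]] - prefix[i + 1]
--         power = powers[i]
--         if 65 <= ord(name[0]) <= 122:
--             shown = other[name][0] if power > 9000 else name
--         else:
--             shown = name if power > 9000 else other[name][0]
--         output.append((shown, score))
--     return output
-- ===== Notes on version B (the rewrite author's own statement) =====
-- stated objective: faster
-- what changed: Replaces the nested participant-by-character scan with a dict built once from character_details, and replaces the quadratic per-index forward run scan with a right-to-left monotonic-stack next-greater pass plus prefix sums.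
-- outside the precondition, e.g. on calculate(['b', 'Goku'], [('Goku', 'K', 5)]): A returns [('b', 0)], B returns [('b', 0)]
import Mathlib
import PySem

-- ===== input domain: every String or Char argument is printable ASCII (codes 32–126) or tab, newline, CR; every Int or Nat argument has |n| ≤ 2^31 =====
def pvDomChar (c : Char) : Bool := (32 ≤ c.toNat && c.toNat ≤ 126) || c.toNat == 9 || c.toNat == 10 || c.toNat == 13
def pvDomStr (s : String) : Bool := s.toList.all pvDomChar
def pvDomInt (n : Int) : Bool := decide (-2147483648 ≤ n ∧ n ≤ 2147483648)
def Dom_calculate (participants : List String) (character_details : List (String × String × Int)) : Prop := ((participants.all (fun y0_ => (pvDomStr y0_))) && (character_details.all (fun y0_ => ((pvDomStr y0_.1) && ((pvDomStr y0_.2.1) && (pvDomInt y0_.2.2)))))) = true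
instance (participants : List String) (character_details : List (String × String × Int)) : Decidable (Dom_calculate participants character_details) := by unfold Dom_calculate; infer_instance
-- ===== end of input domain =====

-- B replaces A's nested participant×character scan by a dict built once, and A's quadratic
-- per-index forward run scan by a monotonic-stack next-greater pass plus prefix sums (objective: faster).

-- ===== PORT A =====
-- `65 <= ord(s[0]) <= 122`; both Pythons evaluate this only on nonempty strings (Pre_), the getD 0 is never used there
def pvIsEnglish (s : String) : Bool :=
  let o := ((PySem.Str.pyGet? s 0).map Char.toNat).getD 0
  65 ≤ o && o ≤ 122

def aCharStep (p : String) (st : PySem.Dict String String × PySem.Dict String String × List Int)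
    (c : String × String × Int) : PySem.Dict String String × PySem.Dict String String × List Int :=
  if pvIsEnglish p then
    let st1 := if p = c.1 then (st.1.insert p c.2.1, st.2.1.insert c.2.1 p, st.2.2 ++ [c.2.2]) else st
    if p = c.2.1 then (st1.1.insert p c.1, st1.2.1.insert c.1 p, st1.2.2 ++ [c.2.2]) else st1
  else
    let st1 := if p = c.1 then (st.1.insert c.2.1 p, st.2.1.insert p c.2.1, st.2.2 ++ [c.2.2]) else st
    if p = c.2.1 then (st1.1.insert c.1 p, st1.2.1.insert p c.1, st1.2.2 ++ [c.2.2]) else st1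

-- the inner `for j in range(i+1, len)` loop with its break, accumulator carried
def aScore (pl : List Int) (x : Int) : List Int → Int → Int
  | [], acc => acc
  | j :: js, acc =>
    if x ≥ PySem.List.pyGetD pl j 0 then aScore pl x js (acc + PySem.List.pyGetD pl j 0) else acc

def calculate (participants : List String) (character_details : List (String × String × Int)) : List (String × Int) :=
  let st := participants.foldl (fun st p => character_details.foldl (aCharStep p) st)
      (PySem.Dict.empty, PySem.Dict.empty, [])
  let e2j := st.1
  let j2e := st.2.1
  let pl := st.2.2
  (PySem.List.pyRange 0 (PySem.List.len pl) 1).foldl (fun out i =>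
    let score := aScore pl (PySem.List.pyGetD pl i 0) (PySem.List.pyRange (i + 1) (PySem.List.len pl) 1) 0
    let pname := PySem.List.pyGetD participants i ""
    if pvIsEnglish pname then
      if PySem.List.pyGetD pl i 0 > 9000 then out ++ [(e2j.getD pname "", score)]
      else out ++ [(pname, score)]
    else
      if PySem.List.pyGetD pl i 0 > 9000 then out ++ [(pname, score)]
      else out ++ [(j2e.getD pname "", score)]) []

-- ===== PORT B =====
-- the `while stack and powers[stack[-1]] <= powers[i]: stack.pop()` loop;
-- Python's stack has its top at the END of the list, the port keeps the top at the HEAD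
def bPop (powers : List Int) (x : Int) : List Int → List Int
  | [] => []
  | t :: rest => if PySem.List.pyGetD powers t 0 ≤ x then bPop powers x rest else t :: rest

def calculate_alt (participants : List String) (character_details : List (String × String × Int)) : List (String × Int) :=
  let other : PySem.Dict String (String × Int) := character_details.foldl
      (fun d c => (d.insert c.1 (c.2.1, c.2.2)).insert c.2.1 (c.1, c.2.2)) PySem.Dict.empty
  let powers := (participants.filter (fun p => other.contains p)).map
      (fun p => (other.getD p ("", 0)).2)
  let n : Int := PySem.List.len powers
  let pref := powers.foldl (fun pr x => pr ++ [PySem.List.pyGetD pr (-1) 0 + x]) [(0 : Int)]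
  let sn := ((PySem.List.pyRange 0 n 1).reverse).foldl
      (fun (st : List Int × List Int) i =>
        let s := bPop powers (PySem.List.pyGetD powers i 0) st.1
        (i :: s, st.2 ++ [match s with | [] => n | t :: _ => t]))
      ([], [])
  let ng := sn.2.reverse
  (PySem.List.pyRange 0 n 1).foldl (fun out i =>
    let name := PySem.List.pyGetD participants i ""
    let score := PySem.List.pyGetD pref (PySem.List.pyGetD ng i 0) 0 - PySem.List.pyGetD pref (i + 1) 0
    let pw := PySem.List.pyGetD powers i 0
    let shown := if pvIsEnglish name then (if pw > 9000 then (other.getD name ("", 0)).1 else name)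
                 else (if pw > 9000 then name else (other.getD name ("", 0)).1)
    out ++ [(shown, score)]) []

-- ===== PRECONDITION & SPEC =====
def pvNames (character_details : List (String × String × Int)) : List String :=
  character_details.flatMap (fun c => [c.1, c.2.1])

-- Pre_ excludes empty-string participants (A raises IndexError on ord(p[0])), participants occurring more than
-- once among the character names (A appends one power level per occurrence and raises IndexError or returns extra
-- positionally misaligned rows), and mixtures of matched and unmatched participants, where A silently skips the
-- unmatched ones, pairs the surviving power levels with participants positionally and raises KeyError whenever
-- such an accidental row needs a name translation.
def Pre_calculate (participants : List String) (character_details : List (String × String × Int)) : Prop :=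
  (∀ p ∈ participants, p ≠ "" ∨ character_details = []) ∧
  ((∀ p ∈ participants, (pvNames character_details).count p = 1) ∨
    (∀ p ∈ participants, (pvNames character_details).count p = 0))
instance (participants : List String) (character_details : List (String × String × Int)) : Decidable (Pre_calculate participants character_details) := by unfold Pre_calculate; infer_instance

def pvWitness_calculate : List String × (List (String × String × Int)) :=
  (["Goku", "Bejita"], [("Goku", "Kakarot", 9001), ("Vegeta", "Bejita", 8000)])

def Spec_calculate (participants : List String) (character_details : List (String × String × Int)) (out : List (String × Int)) : Prop := out = calculate_alt participants character_details
instance (participants : List String) (character_details : List (String × String × Int)) (out : List (String × Int)) : Decidable (Spec_calculate participants character_details out) := by unfold Spec_calculate; infer_instance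

-- ===== CLAIM (what is proved, stated in full; the proofs are below) =====
def Claim_equal_calculate : Prop := ∀ (participants : List String) (character_details : List (String × String × Int)), Dom_calculate participants character_details → Pre_calculate participants character_details → Spec_calculate participants character_details (calculate participants character_details)


-- ===== LEMMAS AND PROOFS =====

-- canonical match data: the unique character entry for a name, its partner name and power
def pvEntry (cd : List (String × String × Int)) (p : String) : Option (String × String × Int) :=
  cd.find? (fun c => p == c.1 || p == c.2.1)

def pvPartner (cd : List (String × String × Int)) (p : String) : String :=
  match pvEntry cd p with
  | some c => if p = c.1 then c.2.1 else c.1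
  | none => ""

def pvPower (cd : List (String × String × Int)) (p : String) : Int :=
  match pvEntry cd p with
  | some c => c.2.2
  | none => 0

lemma pvNames_cons (c : String × String × Int) (cd : List (String × String × Int)) :
    pvNames (c :: cd) = c.1 :: c.2.1 :: pvNames cd := rfl

-- a name occurring exactly once: any matching entry is THE entry find? returns
lemma pvCount_cons (d : String × String × Int) (rest : List (String × String × Int)) (p : String) :
    (pvNames (d :: rest)).count p =
      (pvNames rest).count p + (if d.1 = p then 1 else 0) + (if d.2.1 = p then 1 else 0) := by
  rw [pvNames_cons, List.count_cons, List.count_cons]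
  simp only [beq_iff_eq]
  split_ifs <;> omega

lemma pvEntry_unique (cd : List (String × String × Int)) (p : String)
    (h1 : (pvNames cd).count p = 1) {c : String × String × Int} (hc : c ∈ cd)
    (hm : p = c.1 ∨ p = c.2.1) : pvEntry cd p = some c := by
  induction cd with
  | nil => cases hc
  | cons d rest ih =>
    rw [pvCount_cons] at h1
    rcases List.mem_cons.1 hc with rfl | hc'
    · rcases hm with hm | hm <;> simp [pvEntry, hm]
    · have hmem : p ∈ pvNames rest := by
        refine List.mem_flatMap.2 ⟨c, hc', ?_⟩
        rcases hm with hm | hm <;> simp [hm]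
      have hpos : 0 < (pvNames rest).count p := List.count_pos_iff.2 hmem
      have hd1 : d.1 ≠ p := by
        intro hx; rw [if_pos hx] at h1
        by_cases hy : d.2.1 = p
        · rw [if_pos hy] at h1; omega
        · rw [if_neg hy] at h1; omega
      have hd2 : d.2.1 ≠ p := by
        intro hx; rw [if_pos hx, if_neg hd1] at h1; omega
      have h1' : (pvNames rest).count p = 1 := by
        rw [if_neg hd1, if_neg hd2] at h1; omega
      simpa [pvEntry, List.find?_cons, Ne.symm hd1, Ne.symm hd2] using ih h1' hc'

lemma pvEntry_exists (cd : List (String × String × Int)) (p : String)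
    (h1 : (pvNames cd).count p = 1) : ∃ c ∈ cd, pvEntry cd p = some c := by
  have hpos : 0 < (pvNames cd).count p := by omega
  obtain ⟨c, hc, hm⟩ := List.mem_flatMap.1 (List.count_pos_iff.1 hpos)
  have hm' : p = c.1 ∨ p = c.2.1 := by simpa using hm
  exact ⟨c, hc, pvEntry_unique cd p h1 hc hm'⟩

-- the value every write to key k carries is pvPartner k (when k occurs exactly once)
lemma pvPartner_eq_of_match (cd : List (String × String × Int)) {c : String × String × Int}
    (hc : c ∈ cd) :
    ((pvNames cd).count c.1 = 1 → pvPartner cd c.1 = c.2.1) ∧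
    ((pvNames cd).count c.2.1 = 1 → pvPartner cd c.2.1 = c.1) ∧
    ((pvNames cd).count c.1 = 1 → pvPower cd c.1 = c.2.2) ∧
    ((pvNames cd).count c.2.1 = 1 → pvPower cd c.2.1 = c.2.2) := by
  refine ⟨fun h => ?_, fun h => ?_, fun h => ?_, fun h => ?_⟩
  · rw [pvPartner, pvEntry_unique cd c.1 h hc (Or.inl rfl)]; simp
  · rw [pvPartner, pvEntry_unique cd c.2.1 h hc (Or.inr rfl)]
    by_cases he : c.2.1 = c.1
    · simp [he]
    · simp [he]
  · rw [pvPower, pvEntry_unique cd c.1 h hc (Or.inl rfl)]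
  · rw [pvPower, pvEntry_unique cd c.2.1 h hc (Or.inr rfl)]

-- dict goodness for A's two translation dicts
def GoodA (cd : List (String × String × Int)) (d : PySem.Dict String String) : Prop :=
  ∀ q v, d.get? q = some v → (pvNames cd).count q = 1 → v = pvPartner cd q

lemma GoodA_insert (cd : List (String × String × Int)) {d : PySem.Dict String String}
    (hd : GoodA cd d) {k v : String} (hkv : (pvNames cd).count k = 1 → v = pvPartner cd k) :
    GoodA cd (d.insert k v) := by
  intro q w hq hcount
  rw [PySem.Dict.get?_insert] at hq
  split_ifs at hq with hqk
  · cases hq; subst hqk; exact hkv hcount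
  · exact hd q w hq hcount

-- one participant's pass over the character list
def pvApp (p : String) (c : String × String × Int) : List Int :=
  (if p = c.1 then [c.2.2] else []) ++ (if p = c.2.1 then [c.2.2] else [])

lemma flatMap_app_eq_nil (cd : List (String × String × Int)) (p : String)
    (h : (pvNames cd).count p = 0) : cd.flatMap (pvApp p) = [] := by
  induction cd with
  | nil => rfl
  | cons d rest ih =>
    rw [pvCount_cons] at h
    have h3 : (pvNames rest).count p = 0 ∧ d.1 ≠ p ∧ d.2.1 ≠ p := by
      split_ifs at h with hA hB hC
      exact ⟨by omega, hA, hC⟩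
    simp only [List.flatMap_cons, pvApp, if_neg (Ne.symm h3.2.1), if_neg (Ne.symm h3.2.2),
      ih h3.1]
    rfl

lemma flatMap_app_eq_power (cd : List (String × String × Int)) (p : String)
    (h : (pvNames cd).count p = 1) : cd.flatMap (pvApp p) = [pvPower cd p] := by
  induction cd with
  | nil => simp [pvNames] at h
  | cons d rest ih =>
    have hcc := h
    rw [pvCount_cons] at hcc
    split_ifs at hcc with hA hB hC
    · omega
    · -- p is the English name of d and nothing else
      have hp1 : p = d.1 := hA.symm
      have hp2 : p ≠ d.2.1 := fun hx => hB hx.symm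
      have hrest : (pvNames rest).count p = 0 := by omega
      have hent : pvEntry (d :: rest) p = some d := by
        simp [pvEntry, ← hp1]
      simp only [List.flatMap_cons, pvApp, if_pos hp1, if_neg hp2,
        flatMap_app_eq_nil rest p hrest, pvPower, hent]
      rfl
    · have hp2 : p = d.2.1 := hC.symm
      have hp1 : p ≠ d.1 := fun hx => hA hx.symm
      have hrest : (pvNames rest).count p = 0 := by omega
      have hent : pvEntry (d :: rest) p = some d := by
        simp [pvEntry, ← hp2]
      simp only [List.flatMap_cons, pvApp, if_neg hp1, if_pos hp2,
        flatMap_app_eq_nil rest p hrest, pvPower, hent]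
      rfl
    · have hp1 : p ≠ d.1 := fun hx => hA hx.symm
      have hp2 : p ≠ d.2.1 := fun hx => hC hx.symm
      have hrest : (pvNames rest).count p = 1 := by omega
      have hent : pvEntry (d :: rest) p = pvEntry rest p := by
        simp [pvEntry, hp1, hp2]
      simp only [List.flatMap_cons, pvApp, if_neg hp1, if_neg hp2, ih hrest]
      simp [pvPower, hent]

lemma dict_insert_isSome_mono {ν : Type} (d : PySem.Dict String ν) (k : String) (v : ν)
    (q : String) (h : (d.get? q).isSome) : ((d.insert k v).get? q).isSome := by
  rw [PySem.Dict.get?_insert]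
  split_ifs <;> simp_all

-- one step of A's inner loop: both dicts stay good, the power list grows by pvApp,
-- presence of keys is monotone, and a matching participant's own key gets set
lemma aCharStep_spec (cd : List (String × String × Int)) (p : String)
    {c : String × String × Int} (hc : c ∈ cd)
    (d1 d2 : PySem.Dict String String) (pl : List Int)
    (h1 : GoodA cd d1) (h2 : GoodA cd d2) :
    GoodA cd (aCharStep p (d1, d2, pl) c).1 ∧ GoodA cd (aCharStep p (d1, d2, pl) c).2.1 ∧
    (aCharStep p (d1, d2, pl) c).2.2 = pl ++ pvApp p c ∧
    (∀ q, (d1.get? q).isSome → ((aCharStep p (d1, d2, pl) c).1.get? q).isSome) ∧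
    (∀ q, (d2.get? q).isSome → ((aCharStep p (d1, d2, pl) c).2.1.get? q).isSome) ∧
    ((p = c.1 ∨ p = c.2.1) →
      if pvIsEnglish p then ((aCharStep p (d1, d2, pl) c).1.get? p).isSome
      else ((aCharStep p (d1, d2, pl) c).2.1.get? p).isSome) := by
  obtain ⟨w1, w2, -, -⟩ := pvPartner_eq_of_match cd hc
  have o1 : (pvNames cd).count p = 1 → p = c.1 → c.2.1 = pvPartner cd p := by
    intro hcnt hm; rw [hm]; exact (w1 (hm ▸ hcnt)).symm
  have o2 : (pvNames cd).count p = 1 → p = c.2.1 → c.1 = pvPartner cd p := by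
    intro hcnt hm; rw [hm]; exact (w2 (hm ▸ hcnt)).symm
  have o3 : (pvNames cd).count c.2.1 = 1 → p = c.1 → p = pvPartner cd c.2.1 := by
    intro hcnt hm; rw [hm]; exact (w2 hcnt).symm
  have o4 : (pvNames cd).count c.1 = 1 → p = c.2.1 → p = pvPartner cd c.1 := by
    intro hcnt hm; rw [hm]; exact (w1 hcnt).symm
  by_cases hE : pvIsEnglish p <;> by_cases hm1 : p = c.1 <;> by_cases hm2 : p = c.2.1
  · have hstep : aCharStep p (d1, d2, pl) c =
        ((d1.insert p c.2.1).insert p c.1, (d2.insert c.2.1 p).insert c.1 p,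
          pl ++ [c.2.2] ++ [c.2.2]) := by
      simp only [aCharStep]; rw [if_pos hE, if_pos hm1, if_pos hm2]
    rw [hstep]
    exact ⟨GoodA_insert cd (GoodA_insert cd h1 (fun h => o1 h hm1)) (fun h => o2 h hm2),
      GoodA_insert cd (GoodA_insert cd h2 (fun h => o3 h hm1)) (fun h => o4 h hm2),
      by unfold pvApp; rw [if_pos hm1, if_pos hm2]; simp,
      fun q hq => dict_insert_isSome_mono _ _ _ _ (dict_insert_isSome_mono _ _ _ _ hq),
      fun q hq => dict_insert_isSome_mono _ _ _ _ (dict_insert_isSome_mono _ _ _ _ hq),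
      fun _ => by simp [hE, PySem.Dict.get?_insert_self]⟩
  · have hstep : aCharStep p (d1, d2, pl) c =
        (d1.insert p c.2.1, d2.insert c.2.1 p, pl ++ [c.2.2]) := by
      simp only [aCharStep]; rw [if_pos hE, if_pos hm1, if_neg hm2]
    rw [hstep]
    exact ⟨GoodA_insert cd h1 (fun h => o1 h hm1),
      GoodA_insert cd h2 (fun h => o3 h hm1),
      by unfold pvApp; rw [if_pos hm1, if_neg hm2]; simp,
      fun q hq => dict_insert_isSome_mono _ _ _ _ hq,
      fun q hq => dict_insert_isSome_mono _ _ _ _ hq,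
      fun _ => by simp [hE, PySem.Dict.get?_insert_self]⟩
  · have hstep : aCharStep p (d1, d2, pl) c =
        (d1.insert p c.1, d2.insert c.1 p, pl ++ [c.2.2]) := by
      simp only [aCharStep]; rw [if_pos hE, if_neg hm1, if_pos hm2]
    rw [hstep]
    exact ⟨GoodA_insert cd h1 (fun h => o2 h hm2),
      GoodA_insert cd h2 (fun h => o4 h hm2),
      by unfold pvApp; rw [if_neg hm1, if_pos hm2]; simp,
      fun q hq => dict_insert_isSome_mono _ _ _ _ hq,
      fun q hq => dict_insert_isSome_mono _ _ _ _ hq,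
      fun _ => by simp [hE, PySem.Dict.get?_insert_self]⟩
  · have hstep : aCharStep p (d1, d2, pl) c = (d1, d2, pl) := by
      simp only [aCharStep]; rw [if_pos hE, if_neg hm1, if_neg hm2]
    rw [hstep]
    exact ⟨h1, h2, by unfold pvApp; rw [if_neg hm1, if_neg hm2]; simp, fun q hq => hq, fun q hq => hq,
      fun hm => absurd hm (by simp [hm1, hm2])⟩
  · have hstep : aCharStep p (d1, d2, pl) c =
        ((d1.insert c.2.1 p).insert c.1 p, (d2.insert p c.2.1).insert p c.1,
          pl ++ [c.2.2] ++ [c.2.2]) := by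
      simp only [aCharStep]; rw [if_neg hE, if_pos hm1, if_pos hm2]
    rw [hstep]
    exact ⟨GoodA_insert cd (GoodA_insert cd h1 (fun h => o3 h hm1)) (fun h => o4 h hm2),
      GoodA_insert cd (GoodA_insert cd h2 (fun h => o1 h hm1)) (fun h => o2 h hm2),
      by unfold pvApp; rw [if_pos hm1, if_pos hm2]; simp,
      fun q hq => dict_insert_isSome_mono _ _ _ _ (dict_insert_isSome_mono _ _ _ _ hq),
      fun q hq => dict_insert_isSome_mono _ _ _ _ (dict_insert_isSome_mono _ _ _ _ hq),
      fun _ => by simp [hE, PySem.Dict.get?_insert_self]⟩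
  · have hstep : aCharStep p (d1, d2, pl) c =
        (d1.insert c.2.1 p, d2.insert p c.2.1, pl ++ [c.2.2]) := by
      simp only [aCharStep]; rw [if_neg hE, if_pos hm1, if_neg hm2]
    rw [hstep]
    exact ⟨GoodA_insert cd h1 (fun h => o3 h hm1),
      GoodA_insert cd h2 (fun h => o1 h hm1),
      by unfold pvApp; rw [if_pos hm1, if_neg hm2]; simp,
      fun q hq => dict_insert_isSome_mono _ _ _ _ hq,
      fun q hq => dict_insert_isSome_mono _ _ _ _ hq,
      fun _ => by simp [hE, PySem.Dict.get?_insert_self]⟩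
  · have hstep : aCharStep p (d1, d2, pl) c =
        (d1.insert c.1 p, d2.insert p c.1, pl ++ [c.2.2]) := by
      simp only [aCharStep]; rw [if_neg hE, if_neg hm1, if_pos hm2]
    rw [hstep]
    exact ⟨GoodA_insert cd h1 (fun h => o4 h hm2),
      GoodA_insert cd h2 (fun h => o2 h hm2),
      by unfold pvApp; rw [if_neg hm1, if_pos hm2]; simp,
      fun q hq => dict_insert_isSome_mono _ _ _ _ hq,
      fun q hq => dict_insert_isSome_mono _ _ _ _ hq,
      fun _ => by simp [hE, PySem.Dict.get?_insert_self]⟩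
  · have hstep : aCharStep p (d1, d2, pl) c = (d1, d2, pl) := by
      simp only [aCharStep]; rw [if_neg hE, if_neg hm1, if_neg hm2]
    rw [hstep]
    exact ⟨h1, h2, by unfold pvApp; rw [if_neg hm1, if_neg hm2]; simp, fun q hq => hq, fun q hq => hq,
      fun hm => absurd hm (by simp [hm1, hm2])⟩

-- the inner fold of A's first loop
lemma aInner (cd : List (String × String × Int)) (p : String)
    (l : List (String × String × Int)) (hl : ∀ c ∈ l, c ∈ cd)
    (d1 d2 : PySem.Dict String String) (pl : List Int)
    (h1 : GoodA cd d1) (h2 : GoodA cd d2) :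
    (GoodA cd (l.foldl (aCharStep p) (d1, d2, pl)).1) ∧
    (GoodA cd (l.foldl (aCharStep p) (d1, d2, pl)).2.1) ∧
    ((l.foldl (aCharStep p) (d1, d2, pl)).2.2 = pl ++ l.flatMap (pvApp p)) ∧
    (∀ q, (d1.get? q).isSome → ((l.foldl (aCharStep p) (d1, d2, pl)).1.get? q).isSome) ∧
    (∀ q, (d2.get? q).isSome → ((l.foldl (aCharStep p) (d1, d2, pl)).2.1.get? q).isSome) ∧
    ((∃ c ∈ l, p = c.1 ∨ p = c.2.1) →
      if pvIsEnglish p then ((l.foldl (aCharStep p) (d1, d2, pl)).1.get? p).isSome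
      else ((l.foldl (aCharStep p) (d1, d2, pl)).2.1.get? p).isSome) := by
  induction l generalizing d1 d2 pl with
  | nil =>
    refine ⟨h1, h2, by simp, fun q hq => hq, fun q hq => hq, fun h => ?_⟩
    rcases h with ⟨c, hc, -⟩
    cases hc
  | cons c l ih =>
    have hcin : c ∈ cd := hl c List.mem_cons_self
    have spec := aCharStep_spec cd p hcin d1 d2 pl h1 h2
    rcases hst : aCharStep p (d1, d2, pl) c with ⟨D1, D2, PL⟩
    rw [hst] at spec
    obtain ⟨g1, g2, hpl, m1, m2, hself⟩ := spec
    have hpl' : PL = pl ++ pvApp p c := hpl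
    have ih' := ih (fun c' hc' => hl c' (List.mem_cons_of_mem c hc')) D1 D2 PL g1 g2
    obtain ⟨G1, G2, HPL, M1, M2, HSELF⟩ := ih'
    rw [List.foldl_cons, hst]
    refine ⟨G1, G2, ?_, fun q hq => M1 q (m1 q hq), fun q hq => M2 q (m2 q hq), ?_⟩
    · rw [HPL, hpl']; simp [List.flatMap_cons]
    · intro hex
      rcases hex with ⟨c', hc', hm⟩
      rcases List.mem_cons.1 hc' with rfl | hc''
      · by_cases hE : pvIsEnglish p
        · simp only [hE, if_true] at hself ⊢
          exact M1 p (hself hm)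
        · simp only [hE, Bool.false_eq_true, if_false] at hself ⊢
          exact M2 p (hself hm)
      · exact HSELF ⟨c', hc'', hm⟩

-- A's whole first loop
lemma aOuter (cd : List (String × String × Int)) (l : List String)
    (hl : ∀ p ∈ l, (pvNames cd).count p = 1)
    (d1 d2 : PySem.Dict String String) (pl : List Int)
    (h1 : GoodA cd d1) (h2 : GoodA cd d2) :
    (GoodA cd (l.foldl (fun st p => cd.foldl (aCharStep p) st) (d1, d2, pl)).1) ∧
    (GoodA cd (l.foldl (fun st p => cd.foldl (aCharStep p) st) (d1, d2, pl)).2.1) ∧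
    ((l.foldl (fun st p => cd.foldl (aCharStep p) st) (d1, d2, pl)).2.2 = pl ++ l.map (pvPower cd)) ∧
    (∀ q, (d1.get? q).isSome → ((l.foldl (fun st p => cd.foldl (aCharStep p) st) (d1, d2, pl)).1.get? q).isSome) ∧
    (∀ q, (d2.get? q).isSome → ((l.foldl (fun st p => cd.foldl (aCharStep p) st) (d1, d2, pl)).2.1.get? q).isSome) ∧
    (∀ p ∈ l, if pvIsEnglish p then ((l.foldl (fun st p => cd.foldl (aCharStep p) st) (d1, d2, pl)).1.get? p).isSome
      else ((l.foldl (fun st p => cd.foldl (aCharStep p) st) (d1, d2, pl)).2.1.get? p).isSome) := by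
  induction l generalizing d1 d2 pl with
  | nil =>
    exact ⟨h1, h2, by simp, fun q hq => hq, fun q hq => hq, fun p hp => absurd hp (by simp)⟩
  | cons p l ih =>
    have hcnt : (pvNames cd).count p = 1 := hl p List.mem_cons_self
    have inner := aInner cd p cd (fun c hc => hc) d1 d2 pl h1 h2
    rcases hst : cd.foldl (aCharStep p) (d1, d2, pl) with ⟨D1, D2, PL⟩
    rw [hst] at inner
    obtain ⟨g1, g2, hpl, m1, m2, hself⟩ := inner
    have hpl' : PL = pl ++ cd.flatMap (pvApp p) := hpl
    have hplv : PL = pl ++ [pvPower cd p] := by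
      rw [hpl', flatMap_app_eq_power cd p hcnt]
    obtain ⟨c, hc, hent⟩ := pvEntry_exists cd p hcnt
    have hmatch : p = c.1 ∨ p = c.2.1 := by
      have := List.find?_some hent
      simpa using this
    have hselfD := hself ⟨c, hc, hmatch⟩
    have ih' := ih (fun q hq => hl q (List.mem_cons_of_mem p hq)) D1 D2 PL g1 g2
    obtain ⟨G1, G2, HPL, M1, M2, HSELF⟩ := ih'
    rw [List.foldl_cons, hst]
    refine ⟨G1, G2, ?_, fun q hq => M1 q (m1 q hq), fun q hq => M2 q (m2 q hq), ?_⟩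
    · rw [HPL, hplv]; simp
    · intro q hq
      rcases List.mem_cons.1 hq with rfl | hq'
      · by_cases hE : pvIsEnglish q
        · simp only [hE, if_true] at hselfD ⊢
          exact M1 q hselfD
        · simp only [hE, Bool.false_eq_true, if_false] at hselfD ⊢
          exact M2 q hselfD
      · exact HSELF q hq'

-- B-side dict invariant
def GoodB (cd : List (String × String × Int)) (d : PySem.Dict String (String × Int)) : Prop :=
  ∀ q v, d.get? q = some v → (pvNames cd).count q = 1 → v = (pvPartner cd q, pvPower cd q)

lemma GoodB_insert (cd : List (String × String × Int)) {d : PySem.Dict String (String × Int)}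
    (hd : GoodB cd d) {k : String} {v : String × Int}
    (hkv : (pvNames cd).count k = 1 → v = (pvPartner cd k, pvPower cd k)) :
    GoodB cd (d.insert k v) := by
  intro q w hq hcount
  rw [PySem.Dict.get?_insert] at hq
  split_ifs at hq with hqk
  · cases hq; subst hqk; exact hkv hcount
  · exact hd q w hq hcount

lemma bFold (cd : List (String × String × Int))
    (l : List (String × String × Int)) (hl : ∀ c ∈ l, c ∈ cd)
    (d : PySem.Dict String (String × Int)) (hd : GoodB cd d) :
    GoodB cd (l.foldl (fun d c => (d.insert c.1 (c.2.1, c.2.2)).insert c.2.1 (c.1, c.2.2)) d) ∧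
    (∀ q, (d.get? q).isSome →
      ((l.foldl (fun d c => (d.insert c.1 (c.2.1, c.2.2)).insert c.2.1 (c.1, c.2.2)) d).get? q).isSome) ∧
    (∀ c ∈ l, ((l.foldl (fun d c => (d.insert c.1 (c.2.1, c.2.2)).insert c.2.1 (c.1, c.2.2)) d).get? c.1).isSome ∧
      ((l.foldl (fun d c => (d.insert c.1 (c.2.1, c.2.2)).insert c.2.1 (c.1, c.2.2)) d).get? c.2.1).isSome) := by
  induction l generalizing d with
  | nil => exact ⟨hd, fun q hq => hq, fun c hc => absurd hc (by simp)⟩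
  | cons c l ih =>
    have hcin : c ∈ cd := hl c List.mem_cons_self
    obtain ⟨w1, w2, w3, w4⟩ := pvPartner_eq_of_match cd hcin
    have g' : GoodB cd ((d.insert c.1 (c.2.1, c.2.2)).insert c.2.1 (c.1, c.2.2)) := by
      refine GoodB_insert cd (GoodB_insert cd hd ?_) ?_
      · intro h; rw [w1 h, w3 h]
      · intro h; rw [w2 h, w4 h]
    have ih' := ih (fun c' hc' => hl c' (List.mem_cons_of_mem c hc')) _ g'
    obtain ⟨G, M, S⟩ := ih'
    rw [List.foldl_cons]
    refine ⟨G, fun q hq => M q (dict_insert_isSome_mono _ _ _ _ (dict_insert_isSome_mono _ _ _ _ hq)), ?_⟩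
    intro c' hc'
    rcases List.mem_cons.1 hc' with rfl | hc''
    · constructor
      · refine M c'.1 ?_
        rw [PySem.Dict.get?_insert]
        split_ifs <;> simp [PySem.Dict.get?_insert_self]
      · exact M c'.2.1 (by simp [PySem.Dict.get?_insert_self])
    · exact S c' hc''

-- B's dict: lookup of a once-occurring name
lemma bDict (cd : List (String × String × Int)) (p : String)
    (h : (pvNames cd).count p = 1) :
    (cd.foldl (fun d c => (d.insert c.1 (c.2.1, c.2.2)).insert c.2.1 (c.1, c.2.2))
        PySem.Dict.empty).getD p ("", 0) = (pvPartner cd p, pvPower cd p) := by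
  obtain ⟨c, hc, hent⟩ := pvEntry_exists cd p h
  have hmatch : p = c.1 ∨ p = c.2.1 := by
    have := List.find?_some hent
    simpa using this
  obtain ⟨G, -, S⟩ := bFold cd cd (fun c hc => hc) PySem.Dict.empty
    (fun q v hq _ => by simp [PySem.Dict.get?_empty] at hq)
  have hsome : ((cd.foldl (fun d c => (d.insert c.1 (c.2.1, c.2.2)).insert c.2.1 (c.1, c.2.2))
      PySem.Dict.empty).get? p).isSome := by
    rcases hmatch with hm | hm
    · rw [hm]; exact (S c hc).1
    · rw [hm]; exact (S c hc).2
  obtain ⟨v, hv⟩ := Option.isSome_iff_exists.1 hsome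
  rw [PySem.Dict.getD_eq_get?_getD, hv]
  exact G p v hv h

-- ===== run scores: takeWhile characterisation and the monotonic stack =====

def pvTW (pl : List Int) (i : Nat) : List Int :=
  (pl.drop (i + 1)).takeWhile (fun y => decide (pl.getD i 0 ≥ y))

def pvNg (pl : List Int) (i : Nat) : Nat := i + 1 + (pvTW pl i).length

lemma pvNg_gt (pl : List Int) (i : Nat) : i < pvNg pl i := by
  unfold pvNg; omega

def pvChain (pl : List Int) (k : Nat) : List Nat :=
  if _h : k < pl.length then k :: pvChain pl (pvNg pl k) else []
  termination_by pl.length - k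
  decreasing_by have := pvNg_gt pl k; omega

lemma takeWhile_getD_true {α : Type} (l : List α) (q : α → Bool) (d : α) :
    ∀ j < (l.takeWhile q).length, q (l.getD j d) = true := by
  induction l with
  | nil => intro j hj; simp at hj
  | cons x l ih =>
    intro j hj
    rw [List.takeWhile_cons] at hj
    by_cases hx : q x
    · rw [if_pos hx] at hj
      cases j with
      | zero => simpa using hx
      | succ j => exact ih j (by simpa using hj)
    · rw [if_neg hx] at hj; simp at hj

lemma takeWhile_length_eq {α : Type} (l : List α) (q : α → Bool) (d : α) (m : Nat)
    (hm : m ≤ l.length) (h1 : ∀ j < m, q (l.getD j d) = true)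
    (h2 : m = l.length ∨ q (l.getD m d) = false) :
    (l.takeWhile q).length = m := by
  induction l generalizing m with
  | nil => simp at hm ⊢; omega
  | cons x l ih =>
    cases m with
    | zero =>
      rcases h2 with h2 | h2
      · simp at h2
      · rw [List.takeWhile_cons, if_neg (by simpa using h2)]; rfl
    | succ m =>
      have hx : q x = true := h1 0 (by omega)
      rw [List.takeWhile_cons, if_pos hx]
      have h2' : m = l.length ∨ q (l.getD m d) = false := by
        rcases h2 with h2 | h2
        · left; simpa using h2
        · right; simpa using h2
      have := ih m (by simpa using hm) (fun j _ => h1 (j + 1) (by omega)) h2'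
      simpa using this

lemma drop_getD (pl : List Int) (k j : Nat) : (pl.drop k).getD j 0 = pl.getD (k + j) 0 := by
  simp [List.getD_eq_getElem?_getD, List.getElem?_drop]

lemma pvNg_le (pl : List Int) (i : Nat) (h : i < pl.length) : pvNg pl i ≤ pl.length := by
  have := (List.takeWhile_sublist (l := pl.drop (i + 1))
    (p := fun y => decide (pl.getD i 0 ≥ y))).length_le
  unfold pvNg pvTW
  simp only [List.length_drop] at this ⊢
  omega

lemma pvNg_mid (pl : List Int) (i j : Nat) (h1 : i < j) (h2 : j < pvNg pl i) :
    pl.getD j 0 ≤ pl.getD i 0 := by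
  have hj : j - (i + 1) < (pvTW pl i).length := by unfold pvNg at h2; omega
  have := takeWhile_getD_true (pl.drop (i + 1)) (fun y => decide (pl.getD i 0 ≥ y)) 0
    (j - (i + 1)) hj
  rw [drop_getD] at this
  have hji : i + 1 + (j - (i + 1)) = j := by omega
  rw [hji] at this
  simpa using this

lemma pvNg_eq (pl : List Int) (i k : Nat) (h1 : i < k) (h2 : k ≤ pl.length)
    (h3 : ∀ j, i < j → j < k → pl.getD j 0 ≤ pl.getD i 0)
    (h4 : k = pl.length ∨ pl.getD i 0 < pl.getD k 0) :
    pvNg pl i = k := by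
  have hlen : (pvTW pl i).length = k - (i + 1) := by
    apply takeWhile_length_eq (pl.drop (i + 1)) _ 0
    · rw [List.length_drop]; omega
    · intro j hj
      rw [drop_getD]
      simpa using h3 (i + 1 + j) (by omega) (by omega)
    · rcases h4 with h4 | h4
      · left; rw [List.length_drop]; omega
      · right
        rw [drop_getD]
        have hk : i + 1 + (k - (i + 1)) = k := by omega
        rw [hk]
        simp only [decide_eq_false_iff_not]
        omega
  unfold pvNg
  omega

lemma pvChain_nil (pl : List Int) (k : Nat) (h : pl.length ≤ k) : pvChain pl k = [] := by
  rw [pvChain]; simp [Nat.not_lt.2 h]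

lemma pvChain_cons (pl : List Int) (k : Nat) (h : k < pl.length) :
    pvChain pl k = k :: pvChain pl (pvNg pl k) := by
  rw [pvChain]; simp [h]

lemma popChain (pl : List Int) (i : Nat) (_hi : i < pl.length) :
    ∀ fuel k, pl.length - k ≤ fuel → i < k → k ≤ pl.length →
    (∀ j, i < j → j < k → pl.getD j 0 ≤ pl.getD i 0) →
    bPop pl (pl.getD i 0) ((pvChain pl k).map (Nat.cast : Nat → Int)) =
      (pvChain pl (pvNg pl i)).map (Nat.cast : Nat → Int) := by
  intro fuel
  induction fuel with
  | zero =>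
    intro k hfuel hik hkn hmid
    have hk : k = pl.length := by omega
    subst hk
    have hng : pvNg pl i = pl.length :=
      pvNg_eq pl i pl.length hik le_rfl hmid (Or.inl rfl)
    rw [pvChain_nil pl _ le_rfl, hng, pvChain_nil pl _ le_rfl]
    rfl
  | succ fuel ih =>
    intro k hfuel hik hkn hmid
    by_cases hk : k < pl.length
    · rw [pvChain_cons pl k hk]
      simp only [List.map_cons, bPop, PySem.List.pyGetD_natCast]
      by_cases hle : pl.getD k 0 ≤ pl.getD i 0
      · rw [if_pos hle]
        have hgt := pvNg_gt pl k
        refine ih (pvNg pl k) (by omega) (by omega) (pvNg_le pl k hk) ?_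
        intro j hij hjng
        by_cases hjk : j < k
        · exact hmid j hij hjk
        · by_cases hjk' : j = k
          · subst hjk'; exact hle
          · exact le_trans (pvNg_mid pl k j (by omega) hjng) hle
      · rw [if_neg hle]
        have hng : pvNg pl i = k :=
          pvNg_eq pl i k hik (le_of_lt hk) hmid (Or.inr (by omega))
        rw [hng, pvChain_cons pl k hk, List.map_cons]
    · have hk' : k = pl.length := by omega
      subst hk'
      have hng : pvNg pl i = pl.length :=
        pvNg_eq pl i pl.length hik le_rfl hmid (Or.inl rfl)
      rw [pvChain_nil pl _ le_rfl, hng, pvChain_nil pl _ le_rfl]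
      rfl

lemma stackFold (pl : List Int) : ∀ m, m ≤ pl.length → ∀ A0 : List Int,
    (((List.range m).reverse.map (Nat.cast : Nat → Int)).foldl
      (fun (st : List Int × List Int) i =>
        (i :: bPop pl (PySem.List.pyGetD pl i 0) st.1,
          st.2 ++ [match bPop pl (PySem.List.pyGetD pl i 0) st.1 with
            | [] => PySem.List.len pl | t :: _ => t]))
      ((pvChain pl m).map (Nat.cast : Nat → Int), A0))
    = ((pvChain pl 0).map (Nat.cast : Nat → Int),
        A0 ++ ((List.range m).map (fun i => (pvNg pl i : Int))).reverse) := by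
  intro m
  induction m with
  | zero => intro hm A0; simp
  | succ m ih =>
    intro hm A0
    have hmlt : m < pl.length := by omega
    have hms : (List.range (m + 1)).reverse.map (Nat.cast : Nat → Int)
        = (m : Int) :: (List.range m).reverse.map (Nat.cast : Nat → Int) := by
      rw [List.range_succ]; simp
    rw [hms, List.foldl_cons]
    have hpop : bPop pl (PySem.List.pyGetD pl (m : Int) 0)
        ((pvChain pl (m + 1)).map (Nat.cast : Nat → Int))
        = (pvChain pl (pvNg pl m)).map (Nat.cast : Nat → Int) := by
      rw [PySem.List.pyGetD_natCast]
      exact popChain pl m hmlt pl.length (m + 1) (by omega) (by omega) (by omega)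
        (fun j h1 h2 => by omega)
    have hngv : (match (pvChain pl (pvNg pl m)).map (Nat.cast : Nat → Int) with
        | [] => PySem.List.len pl | t :: _ => t) = ((pvNg pl m : Nat) : Int) := by
      by_cases hng : pvNg pl m < pl.length
      · rw [pvChain_cons pl (pvNg pl m) hng, List.map_cons]
      · have heq : pvNg pl m = pl.length := le_antisymm (pvNg_le pl m hmlt) (by omega)
        rw [pvChain_nil pl _ (by omega), heq]
        simp [PySem.List.len_eq]
    simp only [hpop, hngv]
    rw [← List.map_cons, ← pvChain_cons pl m hmlt,
      ih (by omega) (A0 ++ [((pvNg pl m : Nat) : Int)]), List.range_succ]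
    simp

lemma aScoreLemma (pl : List Int) (x : Int) :
    ∀ fuel k acc, pl.length - k ≤ fuel → k ≤ pl.length →
    aScore pl x (PySem.List.pyRange (k : Int) (pl.length : Int) 1) acc =
      acc + ((pl.drop k).takeWhile (fun y => decide (x ≥ y))).sum := by
  intro fuel
  induction fuel with
  | zero =>
    intro k acc hfuel hkn
    have hk : k = pl.length := by omega
    subst hk
    rw [PySem.List.pyRange_one_eq_nil le_rfl]
    simp [aScore, List.drop_length]
  | succ fuel ih =>
    intro k acc hfuel hkn
    by_cases hk : k < pl.length
    · rw [PySem.List.pyRange_one_cons (by exact_mod_cast hk)]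
      simp only [aScore, PySem.List.pyGetD_natCast]
      rw [List.drop_eq_getElem_cons hk, List.getD_eq_getElem pl 0 hk]
      have hcast : (k : Int) + 1 = ((k + 1 : Nat) : Int) := by push_cast; ring
      by_cases hge : x ≥ pl[k]
      · rw [if_pos hge, List.takeWhile_cons, if_pos (by simpa using hge), hcast,
          ih (k + 1) (acc + pl[k]) (by omega) (by omega)]
        simp [add_assoc]
      · rw [if_neg hge, List.takeWhile_cons, if_neg (by simpa using hge)]
        simp
    · have hk' : k = pl.length := by omega
      subst hk'
      rw [PySem.List.pyRange_one_eq_nil le_rfl]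
      simp [aScore, List.drop_length]

lemma prefFold (pl : List Int) :
    ∀ l2 m, pl.drop m = l2 → m ≤ pl.length →
    l2.foldl (fun pr x => pr ++ [PySem.List.pyGetD pr (-1) 0 + x])
        ((List.range (m + 1)).map (fun k => (pl.take k).sum))
      = (List.range (pl.length + 1)).map (fun k => (pl.take k).sum) := by
  intro l2
  induction l2 with
  | nil =>
    intro m hdrop hm
    have : m = pl.length := by
      have := List.drop_eq_nil_iff.1 hdrop
      omega
    rw [this]
    rfl
  | cons x l2 ih =>
    intro m hdrop hm
    have hmlt : m < pl.length := by
      by_contra hcon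
      rw [List.drop_eq_nil_iff.2 (by omega)] at hdrop
      cases hdrop
    have hx : pl[m] = x ∧ pl.drop (m + 1) = l2 := by
      rw [List.drop_eq_getElem_cons hmlt] at hdrop
      exact ⟨by injection hdrop, by injection hdrop⟩
    rw [List.foldl_cons]
    have hlast : PySem.List.pyGetD ((List.range (m + 1)).map (fun k => (pl.take k).sum)) (-1) 0
        = (pl.take m).sum := by
      rw [List.range_succ, List.map_append]
      exact PySem.List.pyGetD_neg_one_append_singleton _ _ _
    rw [hlast]
    have happ : (List.range (m + 1)).map (fun k => (pl.take k).sum) ++ [(pl.take m).sum + x]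
        = (List.range (m + 1 + 1)).map (fun k => (pl.take k).sum) := by
      rw [List.range_succ (n := m + 1), List.map_append]
      congr 1
      simp only [List.map_cons, List.map_nil]
      congr 1
      rw [List.take_add_one, List.getElem?_eq_getElem hmlt]
      simp [hx.1]
    rw [happ]
    exact ih (m + 1) hx.2 (by omega)

lemma segSum (pl : List Int) (i : Nat) :
    (pl.take (pvNg pl i)).sum - (pl.take (i + 1)).sum = (pvTW pl i).sum := by
  have h1 : pvNg pl i = (i + 1) + (pvTW pl i).length := rfl
  have h2 : (pl.drop (i + 1)).take (pvTW pl i).length = pvTW pl i :=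
    (List.prefix_iff_eq_take.1 (List.takeWhile_prefix _)).symm
  rw [h1, List.take_add, List.sum_append, h2]
  ring

lemma foldl_step_append {α β : Type} (g : α → β) (step : List β → α → List β)
    (hstep : ∀ out a, step out a = out ++ [g a]) :
    ∀ (l : List α) (out : List β), l.foldl step out = out ++ l.map g := by
  intro l
  induction l with
  | nil => intro out; simp
  | cons a l ih => intro out; rw [List.foldl_cons, hstep, ih]; simp

-- shown name of participant p with power pw (identical branch structure in both ports)
def pvOutName (cd : List (String × String × Int)) (p : String) (pw : Int) : String :=
  if pvIsEnglish p then (if pw > 9000 then pvPartner cd p else p)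
  else (if pw > 9000 then p else pvPartner cd p)

lemma A_out (participants : List String) (cd : List (String × String × Int))
    (hall : ∀ p ∈ participants, (pvNames cd).count p = 1) :
    calculate participants cd =
      (List.range participants.length).map (fun i =>
        (pvOutName cd (participants.getD i "")
            ((participants.map (pvPower cd)).getD i 0),
          (pvTW (participants.map (pvPower cd)) i).sum)) := by
  have hcnt : ∀ p ∈ participants, (pvNames cd).count p = 1 := hall
  have hout := aOuter cd participants hcnt PySem.Dict.empty PySem.Dict.empty []
    (fun q v hq _ => by simp [PySem.Dict.get?_empty] at hq)
    (fun q v hq _ => by simp [PySem.Dict.get?_empty] at hq)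
  rcases hst : participants.foldl (fun st p => cd.foldl (aCharStep p) st)
      (PySem.Dict.empty, PySem.Dict.empty, ([] : List Int)) with ⟨D1, D2, PL⟩
  rw [hst] at hout
  obtain ⟨G1, G2, HPL, -, -, SELF⟩ := hout
  have HPL' : PL = participants.map (pvPower cd) := by
    have h2 : PL = [] ++ participants.map (pvPower cd) := HPL
    simpa using h2
  have hname1 : ∀ p ∈ participants, pvIsEnglish p = true →
      D1.getD p "" = pvPartner cd p := by
    intro p hp hE
    have hs := SELF p hp
    rw [if_pos hE] at hs
    obtain ⟨v, hv⟩ := Option.isSome_iff_exists.1 hs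
    rw [PySem.Dict.getD_eq_get?_getD, hv]
    exact G1 p v hv (hcnt p hp)
  have hname2 : ∀ p ∈ participants, ¬ (pvIsEnglish p = true) →
      D2.getD p "" = pvPartner cd p := by
    intro p hp hE
    have hs := SELF p hp
    rw [if_neg hE] at hs
    obtain ⟨v, hv⟩ := Option.isSome_iff_exists.1 hs
    rw [PySem.Dict.getD_eq_get?_getD, hv]
    exact G2 p v hv (hcnt p hp)
  simp only [calculate, hst]
  have hplen : (participants.map (pvPower cd)).length = participants.length :=
    List.length_map ..
  have hlenP : PySem.List.len (participants.map (pvPower cd))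
      = (participants.length : Int) := by
    rw [PySem.List.len_eq, hplen]
  rw [HPL', hlenP]
  have hrange : PySem.List.pyRange 0 (participants.length : Int) 1
      = (List.range participants.length).map (Nat.cast : Nat → Int) := by
    rw [PySem.List.pyRange_one]; simp
  rw [hrange]
  rw [foldl_step_append (fun (i : Int) =>
      ((if pvIsEnglish (PySem.List.pyGetD participants i "") = true then
          (if PySem.List.pyGetD (participants.map (pvPower cd)) i 0 > 9000 then
            D1.getD (PySem.List.pyGetD participants i "") ""
          else PySem.List.pyGetD participants i "")
        else
          (if PySem.List.pyGetD (participants.map (pvPower cd)) i 0 > 9000 then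
            PySem.List.pyGetD participants i ""
          else D2.getD (PySem.List.pyGetD participants i "") "")),
        aScore (participants.map (pvPower cd))
          (PySem.List.pyGetD (participants.map (pvPower cd)) i 0)
          (PySem.List.pyRange (i + 1) (participants.length : Int)) 0)) _
    (fun out i => by beta_reduce; split_ifs <;> rfl)]
  simp only [List.nil_append, List.map_map]
  apply List.map_congr_left
  intro i hi
  have hiN : i < participants.length := List.mem_range.1 hi
  simp only [Function.comp_apply, PySem.List.pyGetD_natCast]
  have hmem : participants.getD i "" ∈ participants := by
    rw [List.getD_eq_getElem _ _ hiN]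
    exact List.getElem_mem _
  have hsc : aScore (participants.map (pvPower cd))
      ((participants.map (pvPower cd)).getD i 0)
      (PySem.List.pyRange ((i : Int) + 1) (participants.length : Int)) 0
      = (pvTW (participants.map (pvPower cd)) i).sum := by
    have hcast : (i : Int) + 1 = ((i + 1 : Nat) : Int) := by push_cast; ring
    have hlen2 : (participants.length : Int)
        = ((participants.map (pvPower cd)).length : Int) := by rw [hplen]
    rw [hcast, hlen2, aScoreLemma (participants.map (pvPower cd)) _
      (participants.map (pvPower cd)).length (i + 1) 0 (by omega) (by omega)]
    simp [pvTW]
  rw [hsc]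
  congr 1
  unfold pvOutName
  split_ifs with h1 h2 h3
  · exact hname1 _ hmem h1
  · rfl
  · rfl
  · exact hname2 _ hmem h1

lemma B_out (participants : List String) (cd : List (String × String × Int))
    (hall : ∀ p ∈ participants, (pvNames cd).count p = 1) :
    calculate_alt participants cd =
      (List.range participants.length).map (fun i =>
        (pvOutName cd (participants.getD i "")
            ((participants.map (pvPower cd)).getD i 0),
          (pvTW (participants.map (pvPower cd)) i).sum)) := by
  have hcnt : ∀ p ∈ participants, (pvNames cd).count p = 1 := hall
  have hcontains : ∀ p ∈ participants, (cd.foldl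
      (fun d c => (d.insert c.1 (c.2.1, c.2.2)).insert c.2.1 (c.1, c.2.2))
      PySem.Dict.empty).contains p = true := by
    intro p hp
    obtain ⟨c, hc, hent⟩ := pvEntry_exists cd p (hcnt p hp)
    have hmatch : p = c.1 ∨ p = c.2.1 := by simpa using List.find?_some hent
    obtain ⟨-, -, S⟩ := bFold cd cd (fun c hc => hc) PySem.Dict.empty
      (fun q v hq _ => by simp [PySem.Dict.get?_empty] at hq)
    rw [PySem.Dict.contains_eq_isSome_get?]
    rcases hmatch with hm | hm
    · rw [hm]; exact (S c hc).1
    · rw [hm]; exact (S c hc).2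
  have hfilter : participants.filter (fun p => (cd.foldl
      (fun d c => (d.insert c.1 (c.2.1, c.2.2)).insert c.2.1 (c.1, c.2.2))
      PySem.Dict.empty).contains p) = participants :=
    List.filter_eq_self.mpr hcontains
  have hpow : (participants.filter (fun p => (cd.foldl
        (fun d c => (d.insert c.1 (c.2.1, c.2.2)).insert c.2.1 (c.1, c.2.2))
        PySem.Dict.empty).contains p)).map (fun p => ((cd.foldl
        (fun d c => (d.insert c.1 (c.2.1, c.2.2)).insert c.2.1 (c.1, c.2.2))
        PySem.Dict.empty).getD p ("", 0)).2) = participants.map (pvPower cd) := by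
    rw [hfilter]
    exact List.map_congr_left (fun p hp => by rw [bDict cd p (hcnt p hp)])
  have hpart : ∀ p ∈ participants, ((cd.foldl
        (fun d c => (d.insert c.1 (c.2.1, c.2.2)).insert c.2.1 (c.1, c.2.2))
        PySem.Dict.empty).getD p ("", 0)).1 = pvPartner cd p :=
    fun p hp => by rw [bDict cd p (hcnt p hp)]
  have hplen : (participants.map (pvPower cd)).length = participants.length :=
    List.length_map ..
  simp only [calculate_alt]
  rw [hpow]
  set P := participants.map (pvPower cd) with hP
  have hpref : P.foldl (fun pr x => pr ++ [PySem.List.pyGetD pr (-1) 0 + x]) [0]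
      = (List.range (P.length + 1)).map (fun k => (P.take k).sum) := by
    have hinit : ([(0 : Int)]) = (List.range (0 + 1)).map (fun k => (P.take k).sum) := by simp
    rw [hinit, prefFold P P 0 (by simp) (by omega)]
  have hrangeP : (PySem.List.pyRange 0 (PySem.List.len P) 1).reverse
      = (List.range P.length).reverse.map (Nat.cast : Nat → Int) := by
    rw [PySem.List.len_eq, PySem.List.pyRange_one]
    simp [List.map_reverse]
  have hinit2 : (([], []) : List Int × List Int)
      = ((pvChain P P.length).map (Nat.cast : Nat → Int), ([] : List Int)) := by
    rw [pvChain_nil P _ le_rfl]; rfl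
  have hngl : (((PySem.List.pyRange 0 (PySem.List.len P) 1).reverse).foldl
      (fun (st : List Int × List Int) i =>
        (i :: bPop P (PySem.List.pyGetD P i 0) st.1,
          st.2 ++ [match bPop P (PySem.List.pyGetD P i 0) st.1 with
            | [] => PySem.List.len P | t :: _ => t]))
      ([], [])).2.reverse
      = (List.range P.length).map (fun i => ((pvNg P i : Nat) : Int)) := by
    rw [hrangeP, hinit2, stackFold P P.length le_rfl []]
    simp
  rw [hngl, hpref]
  have hrange3 : PySem.List.pyRange 0 (PySem.List.len P) 1
      = (List.range P.length).map (Nat.cast : Nat → Int) := by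
    rw [PySem.List.len_eq, PySem.List.pyRange_one]
    simp
  rw [hrange3, PySem.List.foldl_append_singleton_eq_map, List.map_map, ← hplen]
  simp only [List.nil_append]
  apply List.map_congr_left
  intro i hi
  have hiP : i < P.length := List.mem_range.1 hi
  have hiN : i < participants.length := by rw [← hplen]; exact hiP
  have hmem : participants.getD i "" ∈ participants := by
    rw [List.getD_eq_getElem _ _ hiN]
    exact List.getElem_mem _
  simp only [Function.comp_apply, PySem.List.pyGetD_natCast]
  have hngget : ((List.range P.length).map (fun j => ((pvNg P j : Nat) : Int))).getD i 0
      = ((pvNg P i : Nat) : Int) := by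
    rw [List.getD_eq_getElem _ _ (by simpa using hiP)]
    simp
  have hcast : (i : Int) + 1 = ((i + 1 : Nat) : Int) := by push_cast; ring
  rw [hngget, PySem.List.pyGetD_natCast, hcast, PySem.List.pyGetD_natCast]
  have hprefget1 : ((List.range (P.length + 1)).map (fun k => (P.take k).sum)).getD (pvNg P i) 0
      = (P.take (pvNg P i)).sum := by
    have : pvNg P i < P.length + 1 := by
      have := pvNg_le P i hiP
      omega
    rw [List.getD_eq_getElem _ _ (by simpa using this)]
    simp
  have hprefget2 : ((List.range (P.length + 1)).map (fun k => (P.take k).sum)).getD (i + 1) 0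
      = (P.take (i + 1)).sum := by
    rw [List.getD_eq_getElem _ _ (by simpa using by omega : i + 1 < ((List.range (P.length + 1)).map (fun k => (P.take k).sum)).length)]
    simp
  rw [hprefget1, hprefget2, segSum P i]
  congr 1
  unfold pvOutName
  split_ifs with h1 h2 h3
  · exact hpart _ hmem
  · rfl
  · rfl
  · exact hpart _ hmem

-- the power-list component of A's first loop, with no assumption on the dicts
lemma aStep_pl (p : String) (st : PySem.Dict String String × PySem.Dict String String × List Int)
    (c : String × String × Int) : (aCharStep p st c).2.2 = st.2.2 ++ pvApp p c := by
  rcases st with ⟨d1, d2, pl⟩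
  unfold aCharStep pvApp
  split_ifs <;> simp

lemma aFold_pl (p : String) (cd : List (String × String × Int)) :
    ∀ st, (cd.foldl (aCharStep p) st).2.2 = st.2.2 ++ cd.flatMap (pvApp p) := by
  induction cd with
  | nil => intro st; simp
  | cons c l ih =>
    intro st
    rw [List.foldl_cons, ih, aStep_pl]
    simp

-- A on a list of participants none of which matches: no power level is ever collected
lemma A_out0 (participants : List String) (cd : List (String × String × Int))
    (h0 : ∀ p ∈ participants, (pvNames cd).count p = 0) :
    calculate participants cd = [] := by
  have hPL : ∀ l : List String, (∀ p ∈ l, (pvNames cd).count p = 0) →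
      ∀ st : PySem.Dict String String × PySem.Dict String String × List Int,
      (l.foldl (fun st p => cd.foldl (aCharStep p) st) st).2.2 = st.2.2 := by
    intro l hl
    induction l with
    | nil => intro st; rfl
    | cons p l ih =>
      intro st
      rw [List.foldl_cons, ih (fun q hq => hl q (List.mem_cons_of_mem p hq)), aFold_pl,
        flatMap_app_eq_nil cd p (hl p List.mem_cons_self)]
      simp
  simp only [calculate]
  rw [hPL participants h0]
  simp [PySem.List.len_eq, PySem.List.pyRange_one_eq_nil]

-- every key of B's dict is a character name
lemma bFold_mem (cd : List (String × String × Int)) :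
    ∀ (d : PySem.Dict String (String × Int)) (q : String),
    (((cd.foldl (fun d c => (d.insert c.1 (c.2.1, c.2.2)).insert c.2.1 (c.1, c.2.2)) d).get? q).isSome) →
    (d.get? q).isSome ∨ q ∈ pvNames cd := by
  induction cd with
  | nil => intro d q h; exact Or.inl h
  | cons c l ih =>
    intro d q h
    rw [List.foldl_cons] at h
    rcases ih _ q h with h' | h'
    · rw [PySem.Dict.get?_insert] at h'
      split_ifs at h' with hq
      · exact Or.inr (by subst hq; simp [pvNames_cons])
      · rw [PySem.Dict.get?_insert] at h'
        split_ifs at h' with hq2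
        · exact Or.inr (by subst hq2; simp [pvNames_cons])
        · exact Or.inl h'
    · exact Or.inr (by simp [pvNames_cons, h'])

lemma B_out0 (participants : List String) (cd : List (String × String × Int))
    (h0 : ∀ p ∈ participants, (pvNames cd).count p = 0) :
    calculate_alt participants cd = [] := by
  have hfilter : participants.filter (fun p => (cd.foldl
      (fun d c => (d.insert c.1 (c.2.1, c.2.2)).insert c.2.1 (c.1, c.2.2))
      PySem.Dict.empty).contains p) = [] := by
    rw [List.filter_eq_nil_iff]
    intro p hp
    rw [PySem.Dict.contains_eq_isSome_get?]
    intro hcon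
    rcases bFold_mem cd PySem.Dict.empty p (by simpa using hcon) with h' | h'
    · simp [PySem.Dict.get?_empty] at h'
    · have := List.count_eq_zero.1 (h0 p hp)
      exact this h'
  simp only [calculate_alt]
  rw [hfilter]
  simp [PySem.List.len_eq, PySem.List.pyRange_one_eq_nil]

-- ===== VERDICT (by name: the statement is the Claim_ definition above) =====
theorem calculate_spec : Claim_equal_calculate := by
  intro participants character_details _ hpre
  show calculate participants character_details = calculate_alt participants character_details
  rcases hpre with ⟨-, hall | h0⟩
  · rw [A_out participants character_details hall, B_out participants character_details hall]
  · rw [A_out0 participants character_details h0, B_out0 participants character_details h0]
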